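-- pv_equiv track=rewrite | github.com/amitportal/language_detector | script_detector.py | _char_lang
-- ===== SOURCE A (Python) =====
-- import string
-- from typing import Dict, Iterable, List, Mapping, MutableMapping, Sequence, Tuple, Union
--
-- UNICODE_RANGES: Dict[str, Sequence[range]] = {
--     "hi":  [range(0x0900, 0x0980)],        # Devanagari
--     "gu":  [range(0x0A80, 0x0B00)],        # Gujarati
--     "pa":  [range(0x0A00, 0x0A80)],        # Gurmukhi
--     "bn":  [range(0x0980, 0x0A00)],        # Bengali / Assamese
--     "or":  [range(0x0B00, 0x0B80)],        # Odia
--     "tam": [range(0x0B80, 0x0C00)],        # Tamil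
--     "te":  [range(0x0C00, 0x0C80)],        # Telugu
--     "kn":  [range(0x0C80, 0x0D00)],        # Kannada
--     "ml":  [range(0x0D00, 0x0D80)],        # Malayalam
--     "ur":  [range(0x0600, 0x0700), range(0x0750, 0x0780)],  # Urdu / Arabic
--     "en":  [range(0x0000, 0x0080), range(0x0080, 0x0100)],  # ASCII + Latin‑1
-- }
--
-- _ASCII = set(map(ord, string.printable))  # printable ASCII ordinals
--
-- def _char_lang(cp: int) -> str | None:
--     """Return language code for *cp* (or ``None`` if unknown). Fast path for
--     ASCII to ‘en’. Uses plain `in` membership on *pre‑built* ``range`` objects.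
--     """
--     if cp in _ASCII:
--         return "en"
--     for lang, ranges in UNICODE_RANGES.items():
--         for r in ranges:
--             if cp in r:
--                 return lang
--     return None
-- ===== SOURCE B (Python) =====
-- from typing import Dict, Sequence
--
-- UNICODE_RANGES: Dict[str, Sequence[range]] = {
--     "hi":  [range(0x0900, 0x0980)],
--     "gu":  [range(0x0A80, 0x0B00)],
--     "pa":  [range(0x0A00, 0x0A80)],
--     "bn":  [range(0x0980, 0x0A00)],
--     "or":  [range(0x0B00, 0x0B80)],
--     "tam": [range(0x0B80, 0x0C00)],
--     "te":  [range(0x0C00, 0x0C80)],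
--     "kn":  [range(0x0C80, 0x0D00)],
--     "ml":  [range(0x0D00, 0x0D80)],
--     "ur":  [range(0x0600, 0x0700), range(0x0750, 0x0780)],
--     "en":  [range(0x0000, 0x0080), range(0x0080, 0x0100)],
-- }
--
-- # Flattened once at import time: disjoint (start, stop, lang) intervals sorted by start.
-- _INTERVALS = sorted(
--     (r.start, r.stop, lang)
--     for lang, ranges in UNICODE_RANGES.items()
--     for r in ranges
-- )
--
-- def _char_lang(cp: int) -> str | None:
--     """Binary search for the rightmost interval whose start <= cp, then
--     check cp against its stop.  (No ASCII special case needed: printable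
--     ASCII lies inside the 0x0000-0x0080 'en' interval.)"""
--     lo, hi = 0, len(_INTERVALS)
--     while lo < hi:
--         mid = (lo + hi) // 2
--         if _INTERVALS[mid][0] <= cp:
--             lo = mid + 1
--         else:
--             hi = mid
--     if lo:
--         _start, stop, lang = _INTERVALS[lo - 1]
--         if cp < stop:
--             return lang
--     return None
-- ===== Notes on version B (the rewrite author's own statement) =====
-- stated objective: alternative
-- what changed: Replaced the ASCII set fast path plus linear scan over the language->ranges dict by a flat table of (start, stop, lang) intervals built once and sorted by start, queried with a hand-rolled binary search on the starts followed by a single stop check.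
import Mathlib
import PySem

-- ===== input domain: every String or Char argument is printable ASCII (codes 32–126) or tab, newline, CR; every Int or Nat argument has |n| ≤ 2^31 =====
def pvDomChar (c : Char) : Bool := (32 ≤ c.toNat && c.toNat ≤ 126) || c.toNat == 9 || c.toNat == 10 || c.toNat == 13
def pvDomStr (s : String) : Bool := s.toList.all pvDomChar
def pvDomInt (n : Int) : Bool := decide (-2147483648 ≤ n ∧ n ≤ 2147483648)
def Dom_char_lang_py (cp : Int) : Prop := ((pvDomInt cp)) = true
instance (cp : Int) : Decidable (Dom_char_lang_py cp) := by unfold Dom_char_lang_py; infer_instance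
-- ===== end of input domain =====

-- B replaces A's ASCII-set fast path + linear scan over the dict of ranges by one
-- sorted flat interval table queried with a binary search (alternative decomposition).

-- ===== PORT A =====
-- ordinals of string.printable, in string.printable's order
def asciiOrdsA : List Int :=
  [48, 49, 50, 51, 52, 53, 54, 55, 56, 57, 97, 98, 99, 100, 101, 102, 103, 104, 105,
   106, 107, 108, 109, 110, 111, 112, 113, 114, 115, 116, 117, 118, 119, 120, 121, 122,
   65, 66, 67, 68, 69, 70, 71, 72, 73, 74, 75, 76, 77, 78, 79, 80, 81, 82, 83, 84, 85,
   86, 87, 88, 89, 90, 33, 34, 35, 36, 37, 38, 39, 40, 41, 42, 43, 44, 45, 46, 47, 58,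
   59, 60, 61, 62, 63, 64, 91, 92, 93, 94, 95, 96, 123, 124, 125, 126, 32, 9, 10, 13, 11, 12]

-- UNICODE_RANGES in dict insertion order; a range(a, b) is the pair (a, b)
def unicodeRangesA : List (String × List (Int × Int)) :=
  [("hi",  [(0x0900, 0x0980)]),
   ("gu",  [(0x0A80, 0x0B00)]),
   ("pa",  [(0x0A00, 0x0A80)]),
   ("bn",  [(0x0980, 0x0A00)]),
   ("or",  [(0x0B00, 0x0B80)]),
   ("tam", [(0x0B80, 0x0C00)]),
   ("te",  [(0x0C00, 0x0C80)]),
   ("kn",  [(0x0C80, 0x0D00)]),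
   ("ml",  [(0x0D00, 0x0D80)]),
   ("ur",  [(0x0600, 0x0700), (0x0750, 0x0780)]),
   ("en",  [(0x0000, 0x0080), (0x0080, 0x0100)])]

-- `cp in r` for the inner loop over one language's ranges
def inRangesA (cp : Int) : List (Int × Int) → Bool
  | [] => false
  | (a, b) :: rest => if a ≤ cp ∧ cp < b then true else inRangesA cp rest

-- the outer for-loop over UNICODE_RANGES.items()
def scanLangsA (cp : Int) : List (String × List (Int × Int)) → Option String
  | [] => none
  | (lang, rs) :: rest => if inRangesA cp rs then some lang else scanLangsA cp rest

def char_lang_py (cp : Int) : Option String :=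
  if cp ∈ asciiOrdsA then some "en" else scanLangsA cp unicodeRangesA

-- ===== PORT B =====
-- _INTERVALS: the same ranges flattened to (start, stop, lang), sorted by start
def intervalsB : List (Int × Int × String) :=
  [(0x0000, 0x0080, "en"),
   (0x0080, 0x0100, "en"),
   (0x0600, 0x0700, "ur"),
   (0x0750, 0x0780, "ur"),
   (0x0900, 0x0980, "hi"),
   (0x0980, 0x0A00, "bn"),
   (0x0A00, 0x0A80, "pa"),
   (0x0A80, 0x0B00, "gu"),
   (0x0B00, 0x0B80, "or"),
   (0x0B80, 0x0C00, "tam"),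
   (0x0C00, 0x0C80, "te"),
   (0x0C80, 0x0D00, "kn"),
   (0x0D00, 0x0D80, "ml")]

-- the while-loop of Source B: bisect-right of cp among the interval starts
def bsearchB (cp : Int) (lo hi : Nat) : Nat :=
  if _h : lo < hi then
    let mid := (lo + hi) / 2
    if ((intervalsB.getD mid (0, 0, "")).1 ≤ cp) then bsearchB cp (mid + 1) hi
    else bsearchB cp lo mid
  else lo
termination_by hi - lo
decreasing_by all_goals omega

def char_lang_py_alt (cp : Int) : Option String :=
  let lo := bsearchB cp 0 intervalsB.length
  if lo ≠ 0 then
    let iv := intervalsB.getD (lo - 1) (0, 0, "")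
    if cp < iv.2.1 then some iv.2.2 else none
  else none

-- ===== PRECONDITION & SPEC =====
def Spec_char_lang_py (cp : Int) (out : Option String) : Prop := out = char_lang_py_alt cp
instance (cp : Int) (out : Option String) : Decidable (Spec_char_lang_py cp out) := by unfold Spec_char_lang_py; infer_instance

-- ===== CLAIM (what is proved, stated in full; the proofs are below) =====
def Claim_equal_char_lang_py : Prop := ∀ (cp : Int), Dom_char_lang_py cp → Spec_char_lang_py cp (char_lang_py cp)

-- ===== LEMMAS AND PROOFS =====
theorem bs0 (cp : Int) (h2 : cp < 0) : bsearchB cp 0 13 = 0 := by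
  rw [bsearchB]; norm_num [intervalsB]
  rw [if_neg (by omega)]
  rw [bsearchB]; norm_num [intervalsB]
  rw [if_neg (by omega)]
  rw [bsearchB]; norm_num [intervalsB]
  rw [if_neg (by omega)]
  rw [bsearchB]; norm_num [intervalsB]
  rw [if_neg (by omega)]
  rw [bsearchB]; norm_num

theorem bs1 (cp : Int) (h1 : 0 ≤ cp) (h2 : cp < 128) : bsearchB cp 0 13 = 1 := by
  rw [bsearchB]; norm_num [intervalsB]
  rw [if_neg (by omega)]
  rw [bsearchB]; norm_num [intervalsB]
  rw [if_neg (by omega)]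
  rw [bsearchB]; norm_num [intervalsB]
  rw [if_neg (by omega)]
  rw [bsearchB]; norm_num [intervalsB]
  rw [if_pos (by omega)]
  rw [bsearchB]; norm_num

theorem bs2 (cp : Int) (h1 : 128 ≤ cp) (h2 : cp < 1536) : bsearchB cp 0 13 = 2 := by
  rw [bsearchB]; norm_num [intervalsB]
  rw [if_neg (by omega)]
  rw [bsearchB]; norm_num [intervalsB]
  rw [if_neg (by omega)]
  rw [bsearchB]; norm_num [intervalsB]
  rw [if_pos (by omega)]
  rw [bsearchB]; norm_num [intervalsB]
  rw [if_neg (by omega)]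
  rw [bsearchB]; norm_num

theorem bs3 (cp : Int) (h1 : 1536 ≤ cp) (h2 : cp < 1872) : bsearchB cp 0 13 = 3 := by
  rw [bsearchB]; norm_num [intervalsB]
  rw [if_neg (by omega)]
  rw [bsearchB]; norm_num [intervalsB]
  rw [if_neg (by omega)]
  rw [bsearchB]; norm_num [intervalsB]
  rw [if_pos (by omega)]
  rw [bsearchB]; norm_num [intervalsB]
  rw [if_pos (by omega)]
  rw [bsearchB]; norm_num

theorem bs4 (cp : Int) (h1 : 1872 ≤ cp) (h2 : cp < 2304) : bsearchB cp 0 13 = 4 := by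
  rw [bsearchB]; norm_num [intervalsB]
  rw [if_neg (by omega)]
  rw [bsearchB]; norm_num [intervalsB]
  rw [if_pos (by omega)]
  rw [bsearchB]; norm_num [intervalsB]
  rw [if_neg (by omega)]
  rw [bsearchB]; norm_num [intervalsB]
  rw [if_neg (by omega)]
  rw [bsearchB]; norm_num

theorem bs5 (cp : Int) (h1 : 2304 ≤ cp) (h2 : cp < 2432) : bsearchB cp 0 13 = 5 := by
  rw [bsearchB]; norm_num [intervalsB]
  rw [if_neg (by omega)]
  rw [bsearchB]; norm_num [intervalsB]
  rw [if_pos (by omega)]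
  rw [bsearchB]; norm_num [intervalsB]
  rw [if_neg (by omega)]
  rw [bsearchB]; norm_num [intervalsB]
  rw [if_pos (by omega)]
  rw [bsearchB]; norm_num

theorem bs6 (cp : Int) (h1 : 2432 ≤ cp) (h2 : cp < 2560) : bsearchB cp 0 13 = 6 := by
  rw [bsearchB]; norm_num [intervalsB]
  rw [if_neg (by omega)]
  rw [bsearchB]; norm_num [intervalsB]
  rw [if_pos (by omega)]
  rw [bsearchB]; norm_num [intervalsB]
  rw [if_pos (by omega)]
  rw [bsearchB]; norm_num

theorem bs7 (cp : Int) (h1 : 2560 ≤ cp) (h2 : cp < 2688) : bsearchB cp 0 13 = 7 := by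
  rw [bsearchB]; norm_num [intervalsB]
  rw [if_pos (by omega)]
  rw [bsearchB]; norm_num [intervalsB]
  rw [if_neg (by omega)]
  rw [bsearchB]; norm_num [intervalsB]
  rw [if_neg (by omega)]
  rw [bsearchB]; norm_num [intervalsB]
  rw [if_neg (by omega)]
  rw [bsearchB]; norm_num

theorem bs8 (cp : Int) (h1 : 2688 ≤ cp) (h2 : cp < 2816) : bsearchB cp 0 13 = 8 := by
  rw [bsearchB]; norm_num [intervalsB]
  rw [if_pos (by omega)]
  rw [bsearchB]; norm_num [intervalsB]
  rw [if_neg (by omega)]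
  rw [bsearchB]; norm_num [intervalsB]
  rw [if_neg (by omega)]
  rw [bsearchB]; norm_num [intervalsB]
  rw [if_pos (by omega)]
  rw [bsearchB]; norm_num

theorem bs9 (cp : Int) (h1 : 2816 ≤ cp) (h2 : cp < 2944) : bsearchB cp 0 13 = 9 := by
  rw [bsearchB]; norm_num [intervalsB]
  rw [if_pos (by omega)]
  rw [bsearchB]; norm_num [intervalsB]
  rw [if_neg (by omega)]
  rw [bsearchB]; norm_num [intervalsB]
  rw [if_pos (by omega)]
  rw [bsearchB]; norm_num [intervalsB]
  rw [if_neg (by omega)]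
  rw [bsearchB]; norm_num

theorem bs10 (cp : Int) (h1 : 2944 ≤ cp) (h2 : cp < 3072) : bsearchB cp 0 13 = 10 := by
  rw [bsearchB]; norm_num [intervalsB]
  rw [if_pos (by omega)]
  rw [bsearchB]; norm_num [intervalsB]
  rw [if_neg (by omega)]
  rw [bsearchB]; norm_num [intervalsB]
  rw [if_pos (by omega)]
  rw [bsearchB]; norm_num [intervalsB]
  rw [if_pos (by omega)]
  rw [bsearchB]; norm_num

theorem bs11 (cp : Int) (h1 : 3072 ≤ cp) (h2 : cp < 3200) : bsearchB cp 0 13 = 11 := by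
  rw [bsearchB]; norm_num [intervalsB]
  rw [if_pos (by omega)]
  rw [bsearchB]; norm_num [intervalsB]
  rw [if_pos (by omega)]
  rw [bsearchB]; norm_num [intervalsB]
  rw [if_neg (by omega)]
  rw [bsearchB]; norm_num [intervalsB]
  rw [if_neg (by omega)]
  rw [bsearchB]; norm_num

theorem bs12 (cp : Int) (h1 : 3200 ≤ cp) (h2 : cp < 3328) : bsearchB cp 0 13 = 12 := by
  rw [bsearchB]; norm_num [intervalsB]
  rw [if_pos (by omega)]
  rw [bsearchB]; norm_num [intervalsB]
  rw [if_pos (by omega)]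
  rw [bsearchB]; norm_num [intervalsB]
  rw [if_neg (by omega)]
  rw [bsearchB]; norm_num [intervalsB]
  rw [if_pos (by omega)]
  rw [bsearchB]; norm_num

theorem bs13 (cp : Int) (h1 : 3328 ≤ cp) : bsearchB cp 0 13 = 13 := by
  rw [bsearchB]; norm_num [intervalsB]
  rw [if_pos (by omega)]
  rw [bsearchB]; norm_num [intervalsB]
  rw [if_pos (by omega)]
  rw [bsearchB]; norm_num [intervalsB]
  rw [if_pos (by omega)]
  rw [bsearchB]; norm_num

theorem mem_ascii (cp : Int) : cp ∈ asciiOrdsA ↔ (9 ≤ cp ∧ cp ≤ 13) ∨ (32 ≤ cp ∧ cp ≤ 126) := by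
  simp [asciiOrdsA]
  omega

theorem not_mem_ascii (cp : Int) (h : cp < 0 ∨ 13 < cp ∧ cp < 32 ∨ 126 < cp) : ¬ cp ∈ asciiOrdsA := by
  rw [mem_ascii]; omega

theorem key (cp : Int) : char_lang_py cp = char_lang_py_alt cp := by
  unfold char_lang_py char_lang_py_alt
  norm_num only [intervalsB, List.length_cons, List.length_nil]
  by_cases hc0 : cp < 0
  ·
    rw [bs0 cp (by omega)]
    rw [if_neg (not_mem_ascii cp (by omega))]
    norm_num [intervalsB, unicodeRangesA, scanLangsA, inRangesA]
    rw [if_neg (show ¬(2304 ≤ cp ∧ cp < 2432) by omega)]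
    rw [if_neg (show ¬(2688 ≤ cp ∧ cp < 2816) by omega)]
    rw [if_neg (show ¬(2560 ≤ cp ∧ cp < 2688) by omega)]
    rw [if_neg (show ¬(2432 ≤ cp ∧ cp < 2560) by omega)]
    rw [if_neg (show ¬(2816 ≤ cp ∧ cp < 2944) by omega)]
    rw [if_neg (show ¬(2944 ≤ cp ∧ cp < 3072) by omega)]
    rw [if_neg (show ¬(3072 ≤ cp ∧ cp < 3200) by omega)]
    rw [if_neg (show ¬(3200 ≤ cp ∧ cp < 3328) by omega)]
    rw [if_neg (show ¬(3328 ≤ cp ∧ cp < 3456) by omega)]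
    rw [if_neg (show ¬(1536 ≤ cp ∧ cp < 1792 ∨ 1872 ≤ cp ∧ cp < 1920) by omega)]
    rw [if_neg (show ¬(0 ≤ cp ∧ cp < 128 ∨ 128 ≤ cp ∧ cp < 256) by omega)]
  by_cases hc1 : cp < 128
  ·
    rw [bs1 cp (by omega) (by omega)]
    by_cases hm : cp ∈ asciiOrdsA
    · rw [if_pos hm]
      norm_num [intervalsB]
      exact fun h => absurd h (by omega)
    · rw [if_neg hm]
      norm_num [intervalsB, unicodeRangesA, scanLangsA, inRangesA]
      rw [if_neg (show ¬(2304 ≤ cp ∧ cp < 2432) by omega)]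
      rw [if_neg (show ¬(2688 ≤ cp ∧ cp < 2816) by omega)]
      rw [if_neg (show ¬(2560 ≤ cp ∧ cp < 2688) by omega)]
      rw [if_neg (show ¬(2432 ≤ cp ∧ cp < 2560) by omega)]
      rw [if_neg (show ¬(2816 ≤ cp ∧ cp < 2944) by omega)]
      rw [if_neg (show ¬(2944 ≤ cp ∧ cp < 3072) by omega)]
      rw [if_neg (show ¬(3072 ≤ cp ∧ cp < 3200) by omega)]
      rw [if_neg (show ¬(3200 ≤ cp ∧ cp < 3328) by omega)]
      rw [if_neg (show ¬(3328 ≤ cp ∧ cp < 3456) by omega)]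
      rw [if_neg (show ¬(1536 ≤ cp ∧ cp < 1792 ∨ 1872 ≤ cp ∧ cp < 1920) by omega)]
      rw [if_pos (show 0 ≤ cp ∧ cp < 128 ∨ 128 ≤ cp ∧ cp < 256 by omega)]
      rw [if_pos (show cp < 128 by omega)]
  by_cases hc2 : cp < 256
  ·
    rw [bs2 cp (by omega) (by omega)]
    rw [if_neg (not_mem_ascii cp (by omega))]
    norm_num [intervalsB, unicodeRangesA, scanLangsA, inRangesA]
    rw [if_neg (show ¬(2304 ≤ cp ∧ cp < 2432) by omega)]
    rw [if_neg (show ¬(2688 ≤ cp ∧ cp < 2816) by omega)]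
    rw [if_neg (show ¬(2560 ≤ cp ∧ cp < 2688) by omega)]
    rw [if_neg (show ¬(2432 ≤ cp ∧ cp < 2560) by omega)]
    rw [if_neg (show ¬(2816 ≤ cp ∧ cp < 2944) by omega)]
    rw [if_neg (show ¬(2944 ≤ cp ∧ cp < 3072) by omega)]
    rw [if_neg (show ¬(3072 ≤ cp ∧ cp < 3200) by omega)]
    rw [if_neg (show ¬(3200 ≤ cp ∧ cp < 3328) by omega)]
    rw [if_neg (show ¬(3328 ≤ cp ∧ cp < 3456) by omega)]
    rw [if_neg (show ¬(1536 ≤ cp ∧ cp < 1792 ∨ 1872 ≤ cp ∧ cp < 1920) by omega)]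
    rw [if_pos (show 0 ≤ cp ∧ cp < 128 ∨ 128 ≤ cp ∧ cp < 256 by omega)]
    rw [if_pos (show cp < 256 by omega)]
  by_cases hc3 : cp < 1536
  ·
    rw [bs2 cp (by omega) (by omega)]
    rw [if_neg (not_mem_ascii cp (by omega))]
    norm_num [intervalsB, unicodeRangesA, scanLangsA, inRangesA]
    rw [if_neg (show ¬(2304 ≤ cp ∧ cp < 2432) by omega)]
    rw [if_neg (show ¬(2688 ≤ cp ∧ cp < 2816) by omega)]
    rw [if_neg (show ¬(2560 ≤ cp ∧ cp < 2688) by omega)]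
    rw [if_neg (show ¬(2432 ≤ cp ∧ cp < 2560) by omega)]
    rw [if_neg (show ¬(2816 ≤ cp ∧ cp < 2944) by omega)]
    rw [if_neg (show ¬(2944 ≤ cp ∧ cp < 3072) by omega)]
    rw [if_neg (show ¬(3072 ≤ cp ∧ cp < 3200) by omega)]
    rw [if_neg (show ¬(3200 ≤ cp ∧ cp < 3328) by omega)]
    rw [if_neg (show ¬(3328 ≤ cp ∧ cp < 3456) by omega)]
    rw [if_neg (show ¬(1536 ≤ cp ∧ cp < 1792 ∨ 1872 ≤ cp ∧ cp < 1920) by omega)]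
    rw [if_neg (show ¬(0 ≤ cp ∧ cp < 128 ∨ 128 ≤ cp ∧ cp < 256) by omega)]
    rw [if_neg (show ¬ cp < 256 by omega)]
  by_cases hc4 : cp < 1792
  ·
    rw [bs3 cp (by omega) (by omega)]
    rw [if_neg (not_mem_ascii cp (by omega))]
    norm_num [intervalsB, unicodeRangesA, scanLangsA, inRangesA]
    rw [if_neg (show ¬(2304 ≤ cp ∧ cp < 2432) by omega)]
    rw [if_neg (show ¬(2688 ≤ cp ∧ cp < 2816) by omega)]
    rw [if_neg (show ¬(2560 ≤ cp ∧ cp < 2688) by omega)]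
    rw [if_neg (show ¬(2432 ≤ cp ∧ cp < 2560) by omega)]
    rw [if_neg (show ¬(2816 ≤ cp ∧ cp < 2944) by omega)]
    rw [if_neg (show ¬(2944 ≤ cp ∧ cp < 3072) by omega)]
    rw [if_neg (show ¬(3072 ≤ cp ∧ cp < 3200) by omega)]
    rw [if_neg (show ¬(3200 ≤ cp ∧ cp < 3328) by omega)]
    rw [if_neg (show ¬(3328 ≤ cp ∧ cp < 3456) by omega)]
    rw [if_pos (show 1536 ≤ cp ∧ cp < 1792 ∨ 1872 ≤ cp ∧ cp < 1920 by omega)]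
    rw [if_pos (show cp < 1792 by omega)]
  by_cases hc5 : cp < 1872
  ·
    rw [bs3 cp (by omega) (by omega)]
    rw [if_neg (not_mem_ascii cp (by omega))]
    norm_num [intervalsB, unicodeRangesA, scanLangsA, inRangesA]
    rw [if_neg (show ¬(2304 ≤ cp ∧ cp < 2432) by omega)]
    rw [if_neg (show ¬(2688 ≤ cp ∧ cp < 2816) by omega)]
    rw [if_neg (show ¬(2560 ≤ cp ∧ cp < 2688) by omega)]
    rw [if_neg (show ¬(2432 ≤ cp ∧ cp < 2560) by omega)]
    rw [if_neg (show ¬(2816 ≤ cp ∧ cp < 2944) by omega)]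
    rw [if_neg (show ¬(2944 ≤ cp ∧ cp < 3072) by omega)]
    rw [if_neg (show ¬(3072 ≤ cp ∧ cp < 3200) by omega)]
    rw [if_neg (show ¬(3200 ≤ cp ∧ cp < 3328) by omega)]
    rw [if_neg (show ¬(3328 ≤ cp ∧ cp < 3456) by omega)]
    rw [if_neg (show ¬(1536 ≤ cp ∧ cp < 1792 ∨ 1872 ≤ cp ∧ cp < 1920) by omega)]
    rw [if_neg (show ¬(0 ≤ cp ∧ cp < 128 ∨ 128 ≤ cp ∧ cp < 256) by omega)]
    rw [if_neg (show ¬ cp < 1792 by omega)]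
  by_cases hc6 : cp < 1920
  ·
    rw [bs4 cp (by omega) (by omega)]
    rw [if_neg (not_mem_ascii cp (by omega))]
    norm_num [intervalsB, unicodeRangesA, scanLangsA, inRangesA]
    rw [if_neg (show ¬(2304 ≤ cp ∧ cp < 2432) by omega)]
    rw [if_neg (show ¬(2688 ≤ cp ∧ cp < 2816) by omega)]
    rw [if_neg (show ¬(2560 ≤ cp ∧ cp < 2688) by omega)]
    rw [if_neg (show ¬(2432 ≤ cp ∧ cp < 2560) by omega)]
    rw [if_neg (show ¬(2816 ≤ cp ∧ cp < 2944) by omega)]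
    rw [if_neg (show ¬(2944 ≤ cp ∧ cp < 3072) by omega)]
    rw [if_neg (show ¬(3072 ≤ cp ∧ cp < 3200) by omega)]
    rw [if_neg (show ¬(3200 ≤ cp ∧ cp < 3328) by omega)]
    rw [if_neg (show ¬(3328 ≤ cp ∧ cp < 3456) by omega)]
    rw [if_pos (show 1536 ≤ cp ∧ cp < 1792 ∨ 1872 ≤ cp ∧ cp < 1920 by omega)]
    rw [if_pos (show cp < 1920 by omega)]
  by_cases hc7 : cp < 2304
  ·
    rw [bs4 cp (by omega) (by omega)]
    rw [if_neg (not_mem_ascii cp (by omega))]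
    norm_num [intervalsB, unicodeRangesA, scanLangsA, inRangesA]
    rw [if_neg (show ¬(2304 ≤ cp ∧ cp < 2432) by omega)]
    rw [if_neg (show ¬(2688 ≤ cp ∧ cp < 2816) by omega)]
    rw [if_neg (show ¬(2560 ≤ cp ∧ cp < 2688) by omega)]
    rw [if_neg (show ¬(2432 ≤ cp ∧ cp < 2560) by omega)]
    rw [if_neg (show ¬(2816 ≤ cp ∧ cp < 2944) by omega)]
    rw [if_neg (show ¬(2944 ≤ cp ∧ cp < 3072) by omega)]
    rw [if_neg (show ¬(3072 ≤ cp ∧ cp < 3200) by omega)]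
    rw [if_neg (show ¬(3200 ≤ cp ∧ cp < 3328) by omega)]
    rw [if_neg (show ¬(3328 ≤ cp ∧ cp < 3456) by omega)]
    rw [if_neg (show ¬(1536 ≤ cp ∧ cp < 1792 ∨ 1872 ≤ cp ∧ cp < 1920) by omega)]
    rw [if_neg (show ¬(0 ≤ cp ∧ cp < 128 ∨ 128 ≤ cp ∧ cp < 256) by omega)]
    rw [if_neg (show ¬ cp < 1920 by omega)]
  by_cases hc8 : cp < 2432
  ·
    rw [bs5 cp (by omega) (by omega)]
    rw [if_neg (not_mem_ascii cp (by omega))]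
    norm_num [intervalsB, unicodeRangesA, scanLangsA, inRangesA]
    rw [if_pos (show 2304 ≤ cp ∧ cp < 2432 by omega)]
    rw [if_pos (show cp < 2432 by omega)]
  by_cases hc9 : cp < 2560
  ·
    rw [bs6 cp (by omega) (by omega)]
    rw [if_neg (not_mem_ascii cp (by omega))]
    norm_num [intervalsB, unicodeRangesA, scanLangsA, inRangesA]
    rw [if_neg (show ¬(2304 ≤ cp ∧ cp < 2432) by omega)]
    rw [if_neg (show ¬(2688 ≤ cp ∧ cp < 2816) by omega)]
    rw [if_neg (show ¬(2560 ≤ cp ∧ cp < 2688) by omega)]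
    rw [if_pos (show 2432 ≤ cp ∧ cp < 2560 by omega)]
    rw [if_pos (show cp < 2560 by omega)]
  by_cases hc10 : cp < 2688
  ·
    rw [bs7 cp (by omega) (by omega)]
    rw [if_neg (not_mem_ascii cp (by omega))]
    norm_num [intervalsB, unicodeRangesA, scanLangsA, inRangesA]
    rw [if_neg (show ¬(2304 ≤ cp ∧ cp < 2432) by omega)]
    rw [if_neg (show ¬(2688 ≤ cp ∧ cp < 2816) by omega)]
    rw [if_pos (show 2560 ≤ cp ∧ cp < 2688 by omega)]
    rw [if_pos (show cp < 2688 by omega)]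
  by_cases hc11 : cp < 2816
  ·
    rw [bs8 cp (by omega) (by omega)]
    rw [if_neg (not_mem_ascii cp (by omega))]
    norm_num [intervalsB, unicodeRangesA, scanLangsA, inRangesA]
    rw [if_neg (show ¬(2304 ≤ cp ∧ cp < 2432) by omega)]
    rw [if_pos (show 2688 ≤ cp ∧ cp < 2816 by omega)]
    rw [if_pos (show cp < 2816 by omega)]
  by_cases hc12 : cp < 2944
  ·
    rw [bs9 cp (by omega) (by omega)]
    rw [if_neg (not_mem_ascii cp (by omega))]
    norm_num [intervalsB, unicodeRangesA, scanLangsA, inRangesA]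
    rw [if_neg (show ¬(2304 ≤ cp ∧ cp < 2432) by omega)]
    rw [if_neg (show ¬(2688 ≤ cp ∧ cp < 2816) by omega)]
    rw [if_neg (show ¬(2560 ≤ cp ∧ cp < 2688) by omega)]
    rw [if_neg (show ¬(2432 ≤ cp ∧ cp < 2560) by omega)]
    rw [if_pos (show 2816 ≤ cp ∧ cp < 2944 by omega)]
    rw [if_pos (show cp < 2944 by omega)]
  by_cases hc13 : cp < 3072
  ·
    rw [bs10 cp (by omega) (by omega)]
    rw [if_neg (not_mem_ascii cp (by omega))]
    norm_num [intervalsB, unicodeRangesA, scanLangsA, inRangesA]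
    rw [if_neg (show ¬(2304 ≤ cp ∧ cp < 2432) by omega)]
    rw [if_neg (show ¬(2688 ≤ cp ∧ cp < 2816) by omega)]
    rw [if_neg (show ¬(2560 ≤ cp ∧ cp < 2688) by omega)]
    rw [if_neg (show ¬(2432 ≤ cp ∧ cp < 2560) by omega)]
    rw [if_neg (show ¬(2816 ≤ cp ∧ cp < 2944) by omega)]
    rw [if_pos (show 2944 ≤ cp ∧ cp < 3072 by omega)]
    rw [if_pos (show cp < 3072 by omega)]
  by_cases hc14 : cp < 3200
  ·
    rw [bs11 cp (by omega) (by omega)]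
    rw [if_neg (not_mem_ascii cp (by omega))]
    norm_num [intervalsB, unicodeRangesA, scanLangsA, inRangesA]
    rw [if_neg (show ¬(2304 ≤ cp ∧ cp < 2432) by omega)]
    rw [if_neg (show ¬(2688 ≤ cp ∧ cp < 2816) by omega)]
    rw [if_neg (show ¬(2560 ≤ cp ∧ cp < 2688) by omega)]
    rw [if_neg (show ¬(2432 ≤ cp ∧ cp < 2560) by omega)]
    rw [if_neg (show ¬(2816 ≤ cp ∧ cp < 2944) by omega)]
    rw [if_neg (show ¬(2944 ≤ cp ∧ cp < 3072) by omega)]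
    rw [if_pos (show 3072 ≤ cp ∧ cp < 3200 by omega)]
    rw [if_pos (show cp < 3200 by omega)]
  by_cases hc15 : cp < 3328
  ·
    rw [bs12 cp (by omega) (by omega)]
    rw [if_neg (not_mem_ascii cp (by omega))]
    norm_num [intervalsB, unicodeRangesA, scanLangsA, inRangesA]
    rw [if_neg (show ¬(2304 ≤ cp ∧ cp < 2432) by omega)]
    rw [if_neg (show ¬(2688 ≤ cp ∧ cp < 2816) by omega)]
    rw [if_neg (show ¬(2560 ≤ cp ∧ cp < 2688) by omega)]
    rw [if_neg (show ¬(2432 ≤ cp ∧ cp < 2560) by omega)]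
    rw [if_neg (show ¬(2816 ≤ cp ∧ cp < 2944) by omega)]
    rw [if_neg (show ¬(2944 ≤ cp ∧ cp < 3072) by omega)]
    rw [if_neg (show ¬(3072 ≤ cp ∧ cp < 3200) by omega)]
    rw [if_pos (show 3200 ≤ cp ∧ cp < 3328 by omega)]
    rw [if_pos (show cp < 3328 by omega)]
  by_cases hc16 : cp < 3456
  ·
    rw [bs13 cp (by omega)]
    rw [if_neg (not_mem_ascii cp (by omega))]
    norm_num [intervalsB, unicodeRangesA, scanLangsA, inRangesA]
    rw [if_neg (show ¬(2304 ≤ cp ∧ cp < 2432) by omega)]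
    rw [if_neg (show ¬(2688 ≤ cp ∧ cp < 2816) by omega)]
    rw [if_neg (show ¬(2560 ≤ cp ∧ cp < 2688) by omega)]
    rw [if_neg (show ¬(2432 ≤ cp ∧ cp < 2560) by omega)]
    rw [if_neg (show ¬(2816 ≤ cp ∧ cp < 2944) by omega)]
    rw [if_neg (show ¬(2944 ≤ cp ∧ cp < 3072) by omega)]
    rw [if_neg (show ¬(3072 ≤ cp ∧ cp < 3200) by omega)]
    rw [if_neg (show ¬(3200 ≤ cp ∧ cp < 3328) by omega)]
    rw [if_pos (show 3328 ≤ cp ∧ cp < 3456 by omega)]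
    rw [if_pos (show cp < 3456 by omega)]
  rw [bs13 cp (by omega)]
  rw [if_neg (not_mem_ascii cp (by omega))]
  norm_num [intervalsB, unicodeRangesA, scanLangsA, inRangesA]
  rw [if_neg (show ¬(2304 ≤ cp ∧ cp < 2432) by omega)]
  rw [if_neg (show ¬(2688 ≤ cp ∧ cp < 2816) by omega)]
  rw [if_neg (show ¬(2560 ≤ cp ∧ cp < 2688) by omega)]
  rw [if_neg (show ¬(2432 ≤ cp ∧ cp < 2560) by omega)]
  rw [if_neg (show ¬(2816 ≤ cp ∧ cp < 2944) by omega)]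
  rw [if_neg (show ¬(2944 ≤ cp ∧ cp < 3072) by omega)]
  rw [if_neg (show ¬(3072 ≤ cp ∧ cp < 3200) by omega)]
  rw [if_neg (show ¬(3200 ≤ cp ∧ cp < 3328) by omega)]
  rw [if_neg (show ¬(3328 ≤ cp ∧ cp < 3456) by omega)]
  rw [if_neg (show ¬(1536 ≤ cp ∧ cp < 1792 ∨ 1872 ≤ cp ∧ cp < 1920) by omega)]
  rw [if_neg (show ¬(0 ≤ cp ∧ cp < 128 ∨ 128 ≤ cp ∧ cp < 256) by omega)]
  rw [if_neg (show ¬ cp < 3456 by omega)]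

-- ===== VERDICT (by name: the statement is the Claim_ definition above) =====
theorem char_lang_py_spec : Claim_equal_char_lang_py := by
  intro cp _
  unfold Spec_char_lang_py
  exact key cp
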